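-- pv_equiv track=rewrite | github.com/szszabi2002/School | Hálózat/PerfectRasberryProgram.py | create_infinite_scroll
-- ===== SOURCE A (Python) =====
-- from typing import Any, Dict, List, Optional, Tuple
--
-- RED_COLOR: Tuple[int, int, int] = (255, 0, 0)  # Port disabled/down
--
-- YELLOW_COLOR: Tuple[int, int, int] = (255, 255, 0)
--
-- WHITE_COLOR: Tuple[int, int, int] = (255, 255, 255)  # Cursor overlay
--
-- def create_infinite_scroll(offset: int) -> List[Tuple[int, int, int]]:
--     """
--     Generate a scrolling animation using an Among Us character.
--     """
--     among_us_character: List[List[int]] = [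
--         [0, 0, 0, 1, 1, 1, 0, 0],
--         [0, 0, 1, 1, 2, 2, 2, 0],
--         [0, 1, 1, 2, 2, 2, 2, 2],
--         [0, 1, 1, 1, 2, 2, 2, 0],
--         [0, 1, 1, 1, 1, 1, 1, 0],
--         [0, 1, 1, 1, 1, 1, 1, 0],
--         [0, 0, 1, 1, 1, 1, 1, 0],
--         [0, 0, 1, 1, 0, 1, 1, 0],
--     ]
--     among_us_colors: Dict[int, Tuple[int, int, int]] = {
--         0: YELLOW_COLOR,
--         1: RED_COLOR,
--         2: WHITE_COLOR,
--     }
--     character_width = 8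
--     return [
--         among_us_colors[among_us_character[row][(col - offset) % character_width]]
--         for row in range(8)
--         for col in range(8)
--     ]
-- ===== SOURCE B (Python) =====
-- from typing import List, Tuple
--
-- _SPRITE = [
--     [0, 0, 0, 1, 1, 1, 0, 0],
--     [0, 0, 1, 1, 2, 2, 2, 0],
--     [0, 1, 1, 2, 2, 2, 2, 2],
--     [0, 1, 1, 1, 2, 2, 2, 0],
--     [0, 1, 1, 1, 1, 1, 1, 0],
--     [0, 1, 1, 1, 1, 1, 1, 0],
--     [0, 0, 1, 1, 1, 1, 1, 0],
--     [0, 0, 1, 1, 0, 1, 1, 0],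
-- ]
-- _PALETTE = [(255, 255, 0), (255, 0, 0), (255, 255, 255)]
--
--
-- def _rotate_rows_right_once(frame):
--     """Rotate every 8-pixel row of a flat 64-pixel frame right by one."""
--     out = []
--     for r in range(8):
--         seg = frame[8 * r: 8 * r + 8]
--         out.append(seg[7])
--         out.extend(seg[:7])
--     return out
--
--
-- def _build_frames():
--     """All 8 frames, each obtained from the previous by a one-step row rotation."""
--     frame = [_PALETTE[v] for row in _SPRITE for v in row]
--     frames = []
--     for _ in range(8):
--         frames.append(frame)
--         frame = _rotate_rows_right_once(frame)
--     return frames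
--
--
-- _FRAMES = _build_frames()
--
--
-- def create_infinite_scroll(offset: int) -> List[Tuple[int, int, int]]:
--     return list(_FRAMES[offset % 8])
-- ===== Notes on version B (the rewrite author's own statement) =====
-- stated objective: alternative
-- what changed: B builds a table of all eight possible frames once at module load, deriving each frame from the previous by a one-step row rotation, and the function itself is a single table lookup keyed by offset mod 8, instead of A recomputing every pixel per call with a per-cell modular index into the sprite and a dict lookup.
import Mathlib
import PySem

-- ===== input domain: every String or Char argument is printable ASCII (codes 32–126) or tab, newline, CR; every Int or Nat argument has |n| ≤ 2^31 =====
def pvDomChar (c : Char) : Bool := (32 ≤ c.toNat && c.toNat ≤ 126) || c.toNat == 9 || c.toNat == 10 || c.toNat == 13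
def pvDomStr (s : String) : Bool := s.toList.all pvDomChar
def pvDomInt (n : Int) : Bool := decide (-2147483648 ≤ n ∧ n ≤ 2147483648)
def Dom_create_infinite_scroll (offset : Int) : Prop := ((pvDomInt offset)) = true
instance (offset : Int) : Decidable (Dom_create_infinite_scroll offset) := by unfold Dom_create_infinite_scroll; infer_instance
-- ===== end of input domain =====

-- B precomputes the 8 possible frames once (each from the previous by a one-step row rotation) and answers by a table lookup at offset % 8 (alternative, table-driven decomposition).

-- ===== PORT A =====
-- A's local among_us_character literal
def pvGridA : List (List Int) :=
  [[0, 0, 0, 1, 1, 1, 0, 0],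
   [0, 0, 1, 1, 2, 2, 2, 0],
   [0, 1, 1, 2, 2, 2, 2, 2],
   [0, 1, 1, 1, 2, 2, 2, 0],
   [0, 1, 1, 1, 1, 1, 1, 0],
   [0, 1, 1, 1, 1, 1, 1, 0],
   [0, 0, 1, 1, 1, 1, 1, 0],
   [0, 0, 1, 1, 0, 1, 1, 0]]

-- A's local among_us_colors dict
def pvColorsA : PySem.Dict Int (Int × Int × Int) :=
  PySem.Dict.ofList [(0, (255, 255, 0)), (1, (255, 0, 0)), (2, (255, 255, 255))]

def create_infinite_scroll (offset : Int) : List (Int × Int × Int) :=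
  -- nested comprehension: for row in range(8) for col in range(8)
  (PySem.List.pyRange 0 8 1).flatMap (fun row =>
    (PySem.List.pyRange 0 8 1).map (fun col =>
      -- indices/keys are always in range (row,col ∈ [0,8), value ∈ {0,1,2}), so the
      -- defaults of pyGetD/Dict.getD are never used and the port is exact
      PySem.Dict.getD pvColorsA
        (PySem.List.pyGetD (PySem.List.pyGetD pvGridA row []) (PySem.Int.mod (col - offset) 8) 0)
        (0, 0, 0)))

-- ===== PORT B =====
def pvSpriteB : List (List Int) :=
  [[0, 0, 0, 1, 1, 1, 0, 0],
   [0, 0, 1, 1, 2, 2, 2, 0],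
   [0, 1, 1, 2, 2, 2, 2, 2],
   [0, 1, 1, 1, 2, 2, 2, 0],
   [0, 1, 1, 1, 1, 1, 1, 0],
   [0, 1, 1, 1, 1, 1, 1, 0],
   [0, 0, 1, 1, 1, 1, 1, 0],
   [0, 0, 1, 1, 0, 1, 1, 0]]

def pvPaletteB : List (Int × Int × Int) := [(255, 255, 0), (255, 0, 0), (255, 255, 255)]

-- _rotate_rows_right_once: out.append(seg[7]); out.extend(seg[:7]) for each 8-pixel row
def pvRotOnce (frame : List (Int × Int × Int)) : List (Int × Int × Int) :=
  (PySem.List.pyRange 0 8 1).foldl (fun out r =>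
    let seg := PySem.List.slice frame (some (8 * r)) (some (8 * r + 8))
    out ++ [PySem.List.pyGetD seg 7 (0, 0, 0)] ++ PySem.List.slice seg none (some 7)) []

-- _build_frames: start from the colored base frame, append and rotate 8 times
def pvFramesB : List (List (Int × Int × Int)) :=
  (let frame0 := pvSpriteB.flatMap (fun row =>
      row.map (fun v => PySem.List.pyGetD pvPaletteB v (0, 0, 0)))
   ((PySem.List.pyRange 0 8 1).foldl
      (fun (st : List (List (Int × Int × Int)) × List (Int × Int × Int)) _ =>
        (st.1 ++ [st.2], pvRotOnce st.2)) ([], frame0))).1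

def create_infinite_scroll_alt (offset : Int) : List (Int × Int × Int) :=
  -- return list(_FRAMES[offset % 8])  (the copy is value-identity, ported as the lookup)
  PySem.List.pyGetD pvFramesB (PySem.Int.mod offset 8) []

-- ===== PRECONDITION & SPEC =====
def Spec_create_infinite_scroll (offset : Int) (out : List (Int × Int × Int)) : Prop := out = create_infinite_scroll_alt offset
instance (offset : Int) (out : List (Int × Int × Int)) : Decidable (Spec_create_infinite_scroll offset out) := by unfold Spec_create_infinite_scroll; infer_instance

-- ===== CLAIM =====
def Claim_equal_create_infinite_scroll : Prop := ∀ (offset : Int), Dom_create_infinite_scroll offset → Spec_create_infinite_scroll offset (create_infinite_scroll offset)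

-- ===== LEMMAS AND PROOFS =====

-- A depends on offset only through offset % 8
theorem pv_keyA (o : Int) :
    create_infinite_scroll o = create_infinite_scroll (PySem.Int.mod o 8) := by
  have h : ∀ c : Int, PySem.Int.mod (c - o) 8 = PySem.Int.mod (c - PySem.Int.mod o 8) 8 := by
    intro c
    simp only [PySem.Int.mod_eq_emod_of_pos (by norm_num : (0:Int) < 8)]
    omega
  simp only [create_infinite_scroll, h]

-- B depends on offset only through offset % 8
theorem pv_keyB (o : Int) :
    create_infinite_scroll_alt o = create_infinite_scroll_alt (PySem.Int.mod o 8) := by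
  have h : PySem.Int.mod (PySem.Int.mod o 8) 8 = PySem.Int.mod o 8 := by
    simp only [PySem.Int.mod_eq_emod_of_pos (by norm_num : (0:Int) < 8)]
    omega
  simp only [create_infinite_scroll_alt, h]

-- ===== VERDICT =====
theorem create_infinite_scroll_spec : Claim_equal_create_infinite_scroll := by
  intro o _
  unfold Spec_create_infinite_scroll
  rw [pv_keyA, pv_keyB]
  have h0 : 0 ≤ PySem.Int.mod o 8 := by
    rw [PySem.Int.mod_eq_emod_of_pos (by norm_num : (0:Int) < 8)]; omega
  have h8 : PySem.Int.mod o 8 < 8 := by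
    rw [PySem.Int.mod_eq_emod_of_pos (by norm_num : (0:Int) < 8)]; omega
  set m := PySem.Int.mod o 8 with hm
  clear_value m
  interval_cases m <;> decide
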